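-- pv_equiv track=rewrite | github.com/Sistemas-AJ/app-sire | backend/automation/worker.py | _summarize_stats
-- ===== SOURCE A (Python) =====
-- def _summarize_stats(items):
--     if not items:
--         return {"ok": 0, "skipped": 0, "errors": 0, "analizados": 0}
--     totals = {"ok": 0, "skipped": 0, "errors": 0, "analizados": 0}
--     for item in items:
--         totals["ok"] += int(item.get("descargas_ok", 0))
--         totals["skipped"] += int(item.get("skipped", 0))
--         totals["errors"] += int(item.get("errors", 0))
--         totals["analizados"] += int(item.get("analizados", 0))
--     return totals
-- ===== SOURCE B (Python) =====
-- def _summarize_stats(items):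
--     seq = list(items)
--
--     def vec(i):
--         return (int(i.get("descargas_ok", 0)), int(i.get("skipped", 0)),
--                 int(i.get("errors", 0)), int(i.get("analizados", 0)))
--
--     def reduce(lo, hi):
--         if hi - lo <= 1:
--             return (0, 0, 0, 0) if lo >= hi else vec(seq[lo])
--         mid = (lo + hi) // 2
--         l = reduce(lo, mid)
--         r = reduce(mid, hi)
--         return (l[0] + r[0], l[1] + r[1], l[2] + r[2], l[3] + r[3])
--
--     ok, skipped, errors, analizados = reduce(0, len(seq))
--     return {"ok": ok, "skipped": skipped, "errors": errors, "analizados": analizados}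
-- ===== Notes on version B (the rewrite author's own statement) =====
-- stated objective: alternative
-- what changed: Replaces A's guarded single fused left-to-right accumulation into a mutable totals dict with a balanced divide-and-conquer reduction: each item is mapped to a 4-tuple and halves of the list are summarized recursively and merged componentwise.
import Mathlib
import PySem

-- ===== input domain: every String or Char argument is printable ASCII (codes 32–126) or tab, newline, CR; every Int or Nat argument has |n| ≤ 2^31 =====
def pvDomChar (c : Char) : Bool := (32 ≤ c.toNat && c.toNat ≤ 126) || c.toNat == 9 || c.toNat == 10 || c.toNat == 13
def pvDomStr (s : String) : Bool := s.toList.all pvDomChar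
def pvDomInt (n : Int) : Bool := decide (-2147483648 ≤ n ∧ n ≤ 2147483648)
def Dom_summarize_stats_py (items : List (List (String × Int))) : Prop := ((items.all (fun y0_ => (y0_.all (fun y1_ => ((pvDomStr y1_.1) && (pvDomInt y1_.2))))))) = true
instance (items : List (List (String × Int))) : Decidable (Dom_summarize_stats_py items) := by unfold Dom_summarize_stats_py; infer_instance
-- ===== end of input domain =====

-- B replaces A's guarded fused left-to-right accumulation into a mutable totals dict
-- with a balanced divide-and-conquer reduction over per-item 4-tuples (objective: alternative).


-- ===== PORT A =====
-- A's loop body: totals["k"] += int(item.get("k2", 0)); int() is the identity on the Int values here.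
def pvStepA (d : PySem.Dict String Int) (item : List (String × Int)) : PySem.Dict String Int :=
  let d := d.modify "ok" 0 (· + (PySem.Dict.mk item).getD "descargas_ok" 0)
  let d := d.modify "skipped" 0 (· + (PySem.Dict.mk item).getD "skipped" 0)
  let d := d.modify "errors" 0 (· + (PySem.Dict.mk item).getD "errors" 0)
  d.modify "analizados" 0 (· + (PySem.Dict.mk item).getD "analizados" 0)

def summarize_stats_py (items : List (List (String × Int))) : List (String × Int) :=
  if items.isEmpty then [("ok", 0), ("skipped", 0), ("errors", 0), ("analizados", 0)]
  else
    (items.foldl pvStepA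
      (PySem.Dict.ofList [("ok", 0), ("skipped", 0), ("errors", 0), ("analizados", 0)])).items

-- ===== PORT B =====
-- Source B's vec(i): the item's four counts as a 4-tuple.
def pvVec (i : List (String × Int)) : Int × Int × Int × Int :=
  ((PySem.Dict.mk i).getD "descargas_ok" 0, (PySem.Dict.mk i).getD "skipped" 0,
   (PySem.Dict.mk i).getD "errors" 0, (PySem.Dict.mk i).getD "analizados" 0)

-- Source B's reduce(lo, hi): the Python halves an index range [lo, hi) on seq; here the
-- same balanced recursion splits the sublist at its midpoint (take/drop at length/2).
def pvReduce (l : List (List (String × Int))) : Int × Int × Int × Int :=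
  if _h : l.length ≤ 1 then
    match l with
    | [] => (0, 0, 0, 0)
    | x :: _ => pvVec x
  else
    let left := pvReduce (l.take (l.length / 2))
    let right := pvReduce (l.drop (l.length / 2))
    (left.1 + right.1, left.2.1 + right.2.1, left.2.2.1 + right.2.2.1, left.2.2.2 + right.2.2.2)
termination_by l.length
decreasing_by
  · simp only [List.length_take]; omega
  · simp only [List.length_drop]; omega

def summarize_stats_py_alt (items : List (List (String × Int))) : List (String × Int) :=
  let t := pvReduce items
  [("ok", t.1), ("skipped", t.2.1), ("errors", t.2.2.1), ("analizados", t.2.2.2)]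

-- ===== PRECONDITION & SPEC =====
def Spec_summarize_stats_py (items : List (List (String × Int))) (out : List (String × Int)) : Prop := out = summarize_stats_py_alt items
instance (items : List (List (String × Int))) (out : List (String × Int)) : Decidable (Spec_summarize_stats_py items out) := by unfold Spec_summarize_stats_py; infer_instance

-- ===== CLAIM (what is proved, stated in full; the proofs are below) =====
def Claim_equal_summarize_stats_py : Prop := ∀ (items : List (List (String × Int))), Dom_summarize_stats_py items → Spec_summarize_stats_py items (summarize_stats_py items)

-- ===== LEMMAS AND PROOFS =====

-- The common yardstick: the four componentwise sums of the per-item vectors.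
def pvSum (l : List (List (String × Int))) : Int × Int × Int × Int :=
  ((l.map (fun i => (pvVec i).1)).sum, (l.map (fun i => (pvVec i).2.1)).sum,
   (l.map (fun i => (pvVec i).2.2.1)).sum, (l.map (fun i => (pvVec i).2.2.2)).sum)

theorem pvSum_append (a b : List (List (String × Int))) :
    pvSum (a ++ b) = ((pvSum a).1 + (pvSum b).1, (pvSum a).2.1 + (pvSum b).2.1,
      (pvSum a).2.2.1 + (pvSum b).2.2.1, (pvSum a).2.2.2 + (pvSum b).2.2.2) := by
  simp [pvSum]

-- B's balanced reduction computes the componentwise sums.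
theorem pvReduce_eq_pvSum (l : List (List (String × Int))) : pvReduce l = pvSum l := by
  induction hn : l.length using Nat.strong_induction_on generalizing l with
  | _ n ih =>
    rw [pvReduce]
    by_cases h : l.length ≤ 1
    · simp only [h, dif_pos]
      match l, h with
      | [], _ => simp [pvSum]
      | [x], _ => simp [pvSum]
    · simp only [h, dif_neg, not_false_iff]
      have h2 : 2 ≤ l.length := by omega
      have hl : (l.take (l.length / 2)).length < n := by simp [List.length_take]; omega
      have hr : (l.drop (l.length / 2)).length < n := by simp [List.length_drop]; omega
      rw [ih _ (hn ▸ hl) _ rfl, ih _ (hn ▸ hr) _ rfl]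
      have := pvSum_append (l.take (l.length / 2)) (l.drop (l.length / 2))
      rw [List.take_append_drop] at this
      rw [this]

-- Loop invariant: A's fold over any starting totals adds the four per-key sums.
theorem pvLoopA (l : List (List (String × Int))) (a b c e : Int) :
    l.foldl pvStepA (PySem.Dict.mk [("ok", a), ("skipped", b), ("errors", c), ("analizados", e)]) =
    PySem.Dict.mk [("ok", a + (pvSum l).1), ("skipped", b + (pvSum l).2.1),
      ("errors", c + (pvSum l).2.2.1), ("analizados", e + (pvSum l).2.2.2)] := by
  induction l generalizing a b c e with
  | nil => simp [pvSum]
  | cons x xs ih =>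
    have hstep : pvStepA (PySem.Dict.mk [("ok", a), ("skipped", b), ("errors", c), ("analizados", e)]) x =
        PySem.Dict.mk [("ok", a + (pvVec x).1), ("skipped", b + (pvVec x).2.1),
          ("errors", c + (pvVec x).2.2.1), ("analizados", e + (pvVec x).2.2.2)] := by
      simp [pvStepA, pvVec, PySem.Dict.modify, PySem.Dict.get?, PySem.Dict.insert, PySem.Dict.getD]
    simp only [List.foldl_cons, hstep, ih]
    simp [pvSum]
    and_intros <;> ring

theorem summarize_stats_py_eq (items : List (List (String × Int))) :
    summarize_stats_py items = summarize_stats_py_alt items := by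
  cases items with
  | nil => simp [summarize_stats_py, summarize_stats_py_alt, pvReduce]
  | cons x xs =>
    show (((x :: xs).foldl pvStepA (PySem.Dict.ofList _)).items) = _
    have h0 : PySem.Dict.ofList [(("ok" : String), (0 : Int)), ("skipped", 0), ("errors", 0), ("analizados", 0)] =
        PySem.Dict.mk [("ok", 0), ("skipped", 0), ("errors", 0), ("analizados", 0)] := by decide
    rw [h0, pvLoopA]
    simp [summarize_stats_py_alt, pvReduce_eq_pvSum]

-- ===== VERDICT (by name: the statement is the Claim_ definition above) =====
theorem summarize_stats_py_spec : Claim_equal_summarize_stats_py := by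
  intro items _
  exact summarize_stats_py_eq items
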